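-- pv_equiv track=rewrite | github.com/srujit12091997/Python-Coding | Striver/Leetcode/sting.py | Maxdif
-- ===== SOURCE A (Python) =====
-- def Maxdif(s):
--     a1 = 0
--     a2 = 0
--     freq ={}
--     for char in s:
--         if char not in freq:
--             freq[char] = 0
--         freq[char] +=1
--     for val in freq.values():
--         if val %2 ==0:
--             a2 += val
--         else:
--             a1 += val
--
--     diff = a1 - a2
--     return diff
-- ===== SOURCE B (Python) =====
-- def Maxdif(s):
--     t = sorted(s)
--     a1 = 0
--     a2 = 0
--     while t:
--         c = t[0]
--         rest = t[1:]
--         k = 0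
--         while k < len(rest) and rest[k] == c:
--             k += 1
--         run = 1 + k
--         if run % 2 == 0:
--             a2 += run
--         else:
--             a1 += run
--         t = rest[k:]
--     return a1 - a2
-- ===== Notes on version B (the rewrite author's own statement) =====
-- stated objective: alternative
-- what changed: B sorts the characters and sums consecutive equal runs in a single scan (run-length grouping), instead of A's hash-dict frequency table followed by a pass over its values.
import Mathlib
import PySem

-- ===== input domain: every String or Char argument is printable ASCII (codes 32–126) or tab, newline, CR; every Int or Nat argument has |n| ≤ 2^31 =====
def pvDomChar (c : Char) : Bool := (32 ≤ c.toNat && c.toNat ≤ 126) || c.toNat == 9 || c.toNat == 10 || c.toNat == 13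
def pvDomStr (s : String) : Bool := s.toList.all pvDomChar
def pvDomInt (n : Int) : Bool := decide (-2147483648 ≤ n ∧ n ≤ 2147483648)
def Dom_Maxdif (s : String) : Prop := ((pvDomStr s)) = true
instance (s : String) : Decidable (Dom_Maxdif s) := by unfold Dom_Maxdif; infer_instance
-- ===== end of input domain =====

-- B replaces A's dict-based frequency counting by sorting the characters and summing
-- consecutive equal runs in one scan (alternative decomposition, same exact result).

-- ===== PORT A =====
def Maxdif (s : String) : Int :=
  let freq := s.toList.foldl (fun d c =>
      let d := if d.contains c then d else d.insert c (0 : Int)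
      d.insert c (d.getD c 0 + 1)) (PySem.Dict.empty)
  let p := freq.values.foldl (fun (p : Int × Int) v =>
      if PySem.Int.mod v 2 == 0 then (p.1, p.2 + v) else (p.1 + v, p.2)) ((0 : Int), (0 : Int))
  p.1 - p.2

-- ===== PORT B =====
-- the run-scanning while loop of Source B: state (t, a1, a2); k = length of the leading run
def MaxdifRuns : List Char → Int → Int → Int
  | [], a1, a2 => a1 - a2
  | c :: rest, a1, a2 =>
    let k := (rest.takeWhile (· == c)).length
    let run : Int := 1 + (k : Int)
    if PySem.Int.mod run 2 == 0 then MaxdifRuns (rest.drop k) a1 (a2 + run)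
    else MaxdifRuns (rest.drop k) (a1 + run) a2
termination_by l => l.length
decreasing_by
  · simp only [List.length_drop, List.length_cons]
    omega
  · simp only [List.length_drop, List.length_cons]
    omega

def Maxdif_alt (s : String) : Int :=
  MaxdifRuns (PySem.List.sorted s.toList (fun x => x) false) 0 0

-- ===== PRECONDITION & SPEC =====
def Spec_Maxdif (s : String) (out : Int) : Prop := out = Maxdif_alt s
instance (s : String) (out : Int) : Decidable (Spec_Maxdif s out) := by unfold Spec_Maxdif; infer_instance

-- ===== CLAIM (what is proved, stated in full; the proofs are below) =====
def Claim_equal_Maxdif : Prop := ∀ (s : String), Dom_Maxdif s → Spec_Maxdif s (Maxdif s)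

-- ===== LEMMAS AND PROOFS =====

-- the signed contribution of one character with frequency n: +n if odd, -n if even
def fOdd (n : Int) : Int := if PySem.Int.mod n 2 == 0 then -n else n

lemma freq_eq_counter (cs : List Char) :
    cs.foldl (fun d c =>
      let d := if d.contains c then d else d.insert c (0 : Int)
      d.insert c (d.getD c 0 + 1)) (PySem.Dict.empty)
    = PySem.Dict.counter cs := by
  rw [← PySem.Dict.foldl_insert_getD_add_one_eq_counter]
  apply PySem.List.foldl_congr_mem
  intro d c _
  by_cases h : d.contains c = true
  · simp [h]
  · have h' : d.contains c = false := by simpa using h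
    simp only [h', Bool.false_eq_true, if_false]
    rw [PySem.Dict.getD_insert_self, PySem.Dict.insert_insert_self,
        PySem.Dict.getD_of_not_contains d _ h']

lemma pair_fold (vs : List Int) (a1 a2 : Int) :
    (vs.foldl (fun (p : Int × Int) v =>
      if PySem.Int.mod v 2 == 0 then (p.1, p.2 + v) else (p.1 + v, p.2)) (a1, a2)).1
    - (vs.foldl (fun (p : Int × Int) v =>
      if PySem.Int.mod v 2 == 0 then (p.1, p.2 + v) else (p.1 + v, p.2)) (a1, a2)).2
    = a1 - a2 + (vs.map fOdd).sum := by
  induction vs generalizing a1 a2 with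
  | nil => simp
  | cons v vs ih =>
    rw [List.foldl_cons]
    split
    next h =>
      rw [ih]
      have hf : fOdd v = -v := by unfold fOdd; rw [if_pos h]
      simp only [List.map_cons, List.sum_cons, hf]; ring
    next h =>
      rw [ih]
      have hf : fOdd v = v := by unfold fOdd; rw [if_neg h]
      simp only [List.map_cons, List.sum_cons, hf]; ring

lemma A_char (s : String) :
    Maxdif s = ((PySem.List.dedup s.toList).map
      (fun c => fOdd ((s.toList.count c : Int)))).sum := by
  show (_ : Int) - _ = _
  rw [freq_eq_counter]
  have hv : (PySem.Dict.counter s.toList).values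
      = (PySem.List.dedup s.toList).map (fun c => ((s.toList.count c : Int))) := by
    show ((PySem.Dict.counter s.toList).items).map (·.2) = _
    rw [PySem.Dict.items_counter]
    simp [List.map_map, Function.comp_def]
  rw [hv, pair_fold, List.map_map]
  simp [Function.comp_def]

-- adding elements all equal to an element already present leaves the set unchanged
lemma foldl_add_const (tk acc : List Char) (c : Char)
    (hall : ∀ x ∈ tk, x = c) (hc : c ∈ acc) :
    tk.foldl PySem.Set.add acc = acc := by
  induction tk with
  | nil => rfl
  | cons x xs ih =>
    have hx : x = c := hall x (by simp)
    have hstep : PySem.Set.add acc x = acc := by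
      simp [PySem.Set.add, PySem.Set.contains, hx, hc]
    rw [List.foldl_cons, hstep]
    exact ih (fun y hy => hall y (by simp [hy]))

lemma foldl_add_cons_notmem (l : List Char) (c : Char) (acc : List Char)
    (h : c ∉ l) :
    l.foldl PySem.Set.add (c :: acc) = c :: l.foldl PySem.Set.add acc := by
  induction l generalizing acc with
  | nil => rfl
  | cons x xs ih =>
    have hxc : x ≠ c := fun he => h (by simp [he])
    have hstep : PySem.Set.add (c :: acc) x = c :: PySem.Set.add acc x := by
      simp only [PySem.Set.add, PySem.Set.contains, List.contains_cons]
      have hbx : (x == c) = false := by simp [hxc]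
      rw [hbx]
      simp only [Bool.false_or]
      split <;> rfl
    rw [List.foldl_cons, hstep, List.foldl_cons]
    exact ih _ (fun hm => h (List.mem_cons_of_mem _ hm))

lemma dedup_run (c : Char) (tk rest' : List Char)
    (hall : ∀ x ∈ tk, x = c) (hni : c ∉ rest') :
    PySem.List.dedup (c :: (tk ++ rest')) = c :: PySem.List.dedup rest' := by
  show PySem.Set.ofList _ = _
  rw [PySem.Set.ofList_eq_foldl, List.foldl_cons, List.foldl_append]
  have h1 : PySem.Set.add [] c = [c] := by rfl
  rw [h1, foldl_add_const tk [c] c hall (by simp),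
      foldl_add_cons_notmem rest' c [] hni,
      PySem.List.dedup_eq_ofList, PySem.Set.ofList_eq_foldl]

-- in a <=-sorted list headed by c, dropping the leading run of c removes every c
lemma not_mem_dropWhile (c : Char) (rest : List Char)
    (hp : (c :: rest).Pairwise (· ≤ ·)) :
    c ∉ rest.dropWhile (· == c) := by
  induction rest with
  | nil => simp
  | cons x xs ih =>
    by_cases hx : x = c
    · subst hx
      rw [List.dropWhile_cons_of_pos (by simp)]
      apply ih
      constructor
      · intro y hy; exact (List.pairwise_cons.mp hp).1 y (by simp [hy])
      · exact (List.pairwise_cons.mp (List.pairwise_cons.mp hp).2).2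
    · rw [List.dropWhile_cons_of_neg (by simp [hx])]
      have hle : c ≤ x := (List.pairwise_cons.mp hp).1 x (by simp)
      have hlt : c < x := lt_of_le_of_ne hle (fun he => hx he.symm)
      intro hmem
      rcases List.mem_cons.mp hmem with he | hm
      · exact hx he.symm
      · have hx2 : x ≤ c :=
          (List.pairwise_cons.mp (List.pairwise_cons.mp hp).2).1 c hm
        exact absurd (lt_of_lt_of_le hlt hx2) (lt_irrefl c)

lemma MaxdifRuns_eq (n : Nat) :
    ∀ (l : List Char), l.length ≤ n → l.Pairwise (· ≤ ·) → ∀ (a1 a2 : Int),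
    MaxdifRuns l a1 a2 = a1 - a2
      + ((PySem.List.dedup l).map (fun c => fOdd ((l.count c : Int)))).sum := by
  induction n with
  | zero =>
    intro l hl _ a1 a2
    have : l = [] := List.length_eq_zero_iff.mp (Nat.le_zero.mp hl)
    subst this; simp [MaxdifRuns]
  | succ n ih =>
    intro l hl hp a1 a2
    match l with
    | [] => simp [MaxdifRuns]
    | c :: rest =>
      set tk := rest.takeWhile (· == c) with htk
      set rest' := rest.dropWhile (· == c) with hrest'
      have hsplit : rest = tk ++ rest' := (List.takeWhile_append_dropWhile).symm
      have hdrop : rest.drop tk.length = rest' := by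
        conv_lhs => rw [hsplit]
        simp
      have hall : ∀ x ∈ tk, x = c := by
        intro x hx
        have := List.mem_takeWhile_imp hx
        simpa using this
      have hni : c ∉ rest' := not_mem_dropWhile c rest hp
      have hcount : (c :: rest).count c = tk.length + 1 := by
        rw [List.count_cons_self, hsplit, List.count_append,
            List.count_eq_length.mpr (by intro x hx; simp [hall x hx]),
            List.count_eq_zero.mpr hni]
      have hcount' : ∀ d ∈ rest', (c :: rest).count d = rest'.count d := by
        intro d hd
        have hdc : d ≠ c := fun he => hni (he ▸ hd)
        rw [List.count_cons_of_ne hdc.symm, hsplit, List.count_append,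
            List.count_eq_zero.mpr (fun hm => hdc (hall d hm))]
        simp
      have hded : PySem.List.dedup (c :: rest) = c :: PySem.List.dedup rest' := by
        rw [hsplit]; exact dedup_run c tk rest' hall hni
      have hp' : rest'.Pairwise (· ≤ ·) := by
        have hrp : rest.Pairwise (· ≤ ·) := (List.pairwise_cons.mp hp).2
        rw [hsplit] at hrp
        exact (List.pairwise_append.mp hrp).2.1
      have hlen : rest'.length ≤ n := by
        have h1 : rest'.length ≤ rest.length := by
          conv_rhs => rw [hsplit]
          simp
        have h2 : rest.length + 1 ≤ n + 1 := by simpa using hl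
        omega
      have hmapc : (List.map (fun d => fOdd (((c :: rest).count d : Int)))
            (PySem.List.dedup rest'))
          = List.map (fun d => fOdd ((rest'.count d : Int))) (PySem.List.dedup rest') :=
        List.map_congr_left (fun d hd => by
          rw [hcount' d ((PySem.List.mem_dedup _ _).mp hd)])
      have hsum : ((PySem.List.dedup (c :: rest)).map
            (fun d => fOdd (((c :: rest).count d : Int)))).sum
          = fOdd (((c :: rest).count c : Int))
            + ((PySem.List.dedup rest').map (fun d => fOdd ((rest'.count d : Int)))).sum := by
        rw [hded, List.map_cons, List.sum_cons, hmapc]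
      have hrun : (1 + (tk.length : Int)) = ((c :: rest).count c : Int) := by
        rw [hcount]; push_cast; ring
      rw [MaxdifRuns]
      simp only [← htk, hdrop]
      split
      next h =>
        rw [ih rest' hlen hp' a1 (a2 + (1 + (tk.length : Int))), hsum]
        have hf : fOdd (((c :: rest).count c : Int)) = -((c :: rest).count c : Int) := by
          unfold fOdd; rw [← hrun, if_pos h]
        rw [hf, ← hrun]; ring
      next h =>
        rw [ih rest' hlen hp' (a1 + (1 + (tk.length : Int))) a2, hsum]
        have hf : fOdd (((c :: rest).count c : Int)) = ((c :: rest).count c : Int) := by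
          unfold fOdd; rw [← hrun, if_neg h]
        rw [hf, ← hrun]; ring

lemma B_char (s : String) :
    Maxdif_alt s = ((PySem.List.dedup s.toList).map
      (fun c => fOdd ((s.toList.count c : Int)))).sum := by
  unfold Maxdif_alt
  set t := PySem.List.sorted s.toList (fun x => x) false with ht
  have hperm : t.Perm s.toList := PySem.List.sorted_perm _ _ _
  have hpair : t.Pairwise (· ≤ ·) := by
    have hsp := PySem.List.sorted_pairwise s.toList (fun x => x)
    simpa using hsp
  rw [MaxdifRuns_eq t.length t (le_refl _) hpair 0 0]
  have hmap : (PySem.List.dedup t).map (fun c => fOdd ((t.count c : Int)))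
      = (PySem.List.dedup t).map (fun c => fOdd ((s.toList.count c : Int))) :=
    List.map_congr_left (fun d _ => by rw [hperm.count_eq])
  have hpermded : (PySem.List.dedup t).Perm (PySem.List.dedup s.toList) := by
    rw [List.perm_ext_iff_of_nodup (PySem.List.nodup_dedup _) (PySem.List.nodup_dedup _)]
    intro a
    rw [PySem.List.mem_dedup, PySem.List.mem_dedup, hperm.mem_iff]
  rw [hmap, ((hpermded.map _).sum_eq : _)]
  ring

-- ===== VERDICT (by name: the statement is the Claim_ definition above) =====
theorem Maxdif_spec : Claim_equal_Maxdif := by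
  intro s _
  show Maxdif s = Maxdif_alt s
  rw [A_char, B_char]
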